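-- pv_equiv track=rewrite | github.com/hidehic0/library | libs/dp.py | article_breakdown
-- ===== SOURCE A (Python) =====
-- from typing import List
--
-- def article_breakdown(lis: List[List[int]]) -> List[List[int]]:
--     """
--     個数制限付きナップサックの品物を分解します
--     個数の値が、各品物の一番右にあれば正常に動作します
--     """
--     res = []
--     for w, v, c in lis:
--         k = 1
--         while c > 0:
--             res.append([w * k, v * k])
--             c -= k
--             k = min(2 * k, c)
--
--     return res
-- ===== SOURCE B (Python) =====
-- from typing import List
--
-- def article_breakdown(lis: List[List[int]]) -> List[List[int]]:
--     def chunks(c: int, p: int) -> List[int]: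
--         # the multiplier of the chunk with power p = 2^i is a pure function of (c, p)
--         k = min(p, c + 1 - p)
--         return [] if k <= 0 else [k] + chunks(c, 2 * p)
--
--     return [[w * k, v * k] for w, v, c in lis for k in chunks(c, 1)]
-- ===== Notes on version B (the rewrite author's own statement) =====
-- stated objective: alternative
-- what changed: A mutates a running residual c and a doubled-then-clamped k in an imperative append loop; B has no running residual: a recursive helper yields each chunk multiplier as the pure closed formula min(2^i, c+1-2^i) of the chunk index, and the result is one flat comprehension over rows and multipliers.
import Mathlib
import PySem

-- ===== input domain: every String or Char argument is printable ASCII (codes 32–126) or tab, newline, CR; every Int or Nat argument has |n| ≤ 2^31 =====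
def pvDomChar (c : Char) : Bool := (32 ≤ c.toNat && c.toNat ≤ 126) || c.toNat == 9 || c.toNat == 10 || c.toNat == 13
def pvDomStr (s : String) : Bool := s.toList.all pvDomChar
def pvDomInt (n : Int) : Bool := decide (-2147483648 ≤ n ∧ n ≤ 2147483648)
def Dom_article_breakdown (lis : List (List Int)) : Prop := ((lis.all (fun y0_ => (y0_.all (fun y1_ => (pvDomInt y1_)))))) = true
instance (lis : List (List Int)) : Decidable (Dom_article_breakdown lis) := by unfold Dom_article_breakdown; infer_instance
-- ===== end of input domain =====

-- B is an alternative formulation: instead of A's imperative loop mutating a running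
-- residual c and a doubled-then-clamped k, a recursive helper yields each chunk
-- multiplier as the pure formula min(2^i, c+1-2^i) of the chunk index, consumed by one
-- flat comprehension.  Equivalence of return values is proved on rows that are triples (Pre_).

-- ===== PORT A =====
-- inner `while c > 0` loop of A; `fuel` is a totality bound only (each iteration
-- decreases c by k ≥ 1, so fuel = c.toNat suffices and the guard never fires early).
def pvLoopA (w v : Int) : Nat → Int → Int → List (List Int)
  | 0, _, _ => []
  | fuel + 1, c, k =>
    if 0 < c then [w * k, v * k] :: pvLoopA w v fuel (c - k) (min (2 * k) (c - k))
    else []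

def pvStepA (res : List (List Int)) (row : List Int) : List (List Int) :=
  match row with
  | [w, v, c] => res ++ pvLoopA w v c.toNat c 1
  | _ => res

def article_breakdown (lis : List (List Int)) : List (List Int) :=
  lis.foldl pvStepA []

-- ===== PORT B =====
-- B's recursive `chunks(c, p)`: the multiplier of the chunk with power p = 2^i is the
-- pure formula min(p, c+1-p); recursion stops as soon as it is ≤ 0.
def pvChunks (c p : Int) : List Int :=
  if h : 0 < min p (c + 1 - p) then min p (c + 1 - p) :: pvChunks c (2 * p)
  else []
termination_by (c + 1 - p).toNat
decreasing_by
  have h2 := lt_min_iff.mp h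
  omega

-- B's flat comprehension `[[w*k, v*k] for w, v, c in lis for k in chunks(c, 1)]`
def article_breakdown_alt (lis : List (List Int)) : List (List Int) :=
  lis.flatMap (fun row =>
    match row with
    | [w, v, c] => (pvChunks c 1).map (fun k => [w * k, v * k])
    | _ => [])

-- ===== PRECONDITION & SPEC =====
-- Pre_ excludes only rows that are not triples, on which A's tuple unpacking raises ValueError.
def Pre_article_breakdown (lis : List (List Int)) : Prop := ∀ row ∈ lis, row.length = 3
instance (lis : List (List Int)) : Decidable (Pre_article_breakdown lis) := by unfold Pre_article_breakdown; infer_instance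

def pvWitness_article_breakdown : List (List Int) := [[2, 3, 5], [1, 1, 0], [4, 7, 13]]

def Spec_article_breakdown (lis : List (List Int)) (out : List (List Int)) : Prop := out = article_breakdown_alt lis
instance (lis : List (List Int)) (out : List (List Int)) : Decidable (Spec_article_breakdown lis out) := by unfold Spec_article_breakdown; infer_instance

-- ===== CLAIM (what is proved, stated in full; the proofs are below) =====
def Claim_equal_article_breakdown : Prop := ∀ (lis : List (List Int)), Dom_article_breakdown lis → Pre_article_breakdown lis → Spec_article_breakdown lis (article_breakdown lis)

-- ===== LEMMAS AND PROOFS =====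

theorem pvLoopA_nonpos (w v : Int) (fuel : Nat) (c k : Int) (hc : ¬ 0 < c) :
    pvLoopA w v fuel c k = [] := by
  cases fuel <;> simp [pvLoopA, hc]

-- core: A's loop state (residual c+1-p, clamped k = min p (c+1-p)) computes exactly
-- the mapped chunk list of B, for every power p ≥ 1.
theorem pvLoopA_eq_chunks (w v c : Int) : ∀ (fuel : Nat) (p : Int), 1 ≤ p →
    (c + 1 - p).toNat ≤ fuel →
    pvLoopA w v fuel (c + 1 - p) (min p (c + 1 - p))
      = (pvChunks c p).map (fun k => [w * k, v * k]) := by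
  intro fuel
  induction fuel with
  | zero =>
    intro p hp hf
    have hc : c + 1 - p ≤ 0 := by omega
    rw [pvChunks, dif_neg (by omega)]
    simp [pvLoopA]
  | succ f ih =>
    intro p hp hf
    by_cases hc : 0 < c + 1 - p
    · have hk : 0 < min p (c + 1 - p) := lt_min_iff.mpr ⟨by omega, hc⟩
      rw [pvChunks, dif_pos hk]
      simp only [pvLoopA, if_pos hc, List.map_cons, List.cons.injEq]
      refine ⟨trivial, ?_⟩
      by_cases hple : p ≤ c + 1 - p
      · have hmk : min p (c + 1 - p) = p := min_eq_left hple
        rw [hmk]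
        have he : c + 1 - p - p = c + 1 - 2 * p := by ring
        rw [he]
        exact ih (2 * p) (by omega) (by omega)
      · have hmk : min p (c + 1 - p) = c + 1 - p := min_eq_right (by omega)
        rw [hmk, sub_self, pvLoopA_nonpos w v f 0 _ (by omega)]
        rw [pvChunks, dif_neg (by omega)]
        simp
    · rw [pvLoopA_nonpos w v (f + 1) _ _ hc]
      rw [pvChunks, dif_neg (by omega)]
      simp
theorem pvRow_eq (w v c : Int) :
    pvLoopA w v c.toNat c 1 = (pvChunks c 1).map (fun k => [w * k, v * k]) := by
  by_cases hc : 0 < c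
  · have h1 : min (1 : Int) c = 1 := min_eq_left (by omega)
    have := pvLoopA_eq_chunks w v c c.toNat 1 le_rfl (by omega)
    simpa [h1] using this
  · rw [pvLoopA_nonpos w v _ _ _ hc, pvChunks, dif_neg (by omega)]
    simp

theorem foldl_eq (lis : List (List Int)) (hp : ∀ row ∈ lis, row.length = 3) :
    ∀ acc : List (List Int), lis.foldl pvStepA acc = acc ++ article_breakdown_alt lis := by
  induction lis with
  | nil => intro acc; simp [article_breakdown_alt]
  | cons row rest ih =>
    intro acc
    have h3 : row.length = 3 := hp row (by simp)
    obtain ⟨w, v, c, hrow⟩ : ∃ w v c, row = [w, v, c] := by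
      match row, h3 with
      | [w, v, c], _ => exact ⟨w, v, c, rfl⟩
    subst hrow
    simp only [List.foldl_cons, pvStepA, article_breakdown_alt, List.flatMap_cons]
    rw [ih (fun r hr => hp r (by simp [hr])), pvRow_eq]
    simp [article_breakdown_alt, List.append_assoc]

-- ===== VERDICT (by name: the statement is the Claim_ definition above) =====
theorem article_breakdown_spec : Claim_equal_article_breakdown := by
  intro lis _ hpre
  unfold Spec_article_breakdown article_breakdown
  simpa using foldl_eq lis hpre []
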